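-- pv_equiv track=rewrite | github.com/orlandogordon/pocket-watcher-api | src/parser/ameriprise.py | _normalize_transaction_type
-- ===== SOURCE A (Python) =====
-- def _normalize_transaction_type(raw_type: str) -> str:
--     """
--     Map Ameriprise transaction types to standard types:
--     BUY, SELL, DIVIDEND, INTEREST, FEE, TRANSFER, OTHER
--     """
--     raw_type_upper = raw_type.upper().strip()
--
--     # BUY transactions
--     if any(word in raw_type_upper for word in ['PURCHASE', 'BUY']):
--         return 'BUY'
--
--     # SELL transactions
--     if any(word in raw_type_upper for word in ['SALE', 'SELL']):
--         return 'SELL'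
--
--     # DIVIDEND transactions
--     if 'DIVIDEND' in raw_type_upper:
--         return 'DIVIDEND'
--
--     # INTEREST transactions
--     if 'INTEREST' in raw_type_upper:
--         return 'INTEREST'
--
--     # FEE transactions
--     if any(word in raw_type_upper for word in ['FEE', 'BILL']):
--         return 'FEE'
--
--     # TRANSFER transactions (ACH, deposits, withdrawals)
--     if any(word in raw_type_upper for word in ['ACH', 'DEPOSIT', 'WITHDRAWAL', 'TRANSFER']):
--         return 'TRANSFER'
--
--     # Everything else
--     return 'OTHER'
-- ===== SOURCE B (Python) =====
-- _KEYWORD_PRIORITY = {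
--     'PURCHASE': 0, 'BUY': 0,
--     'SALE': 1, 'SELL': 1,
--     'DIVIDEND': 2,
--     'INTEREST': 3,
--     'FEE': 4, 'BILL': 4,
--     'ACH': 5, 'DEPOSIT': 5, 'WITHDRAWAL': 5, 'TRANSFER': 5,
-- }
-- _CATEGORIES = ['BUY', 'SELL', 'DIVIDEND', 'INTEREST', 'FEE', 'TRANSFER']
--
--
-- def _normalize_transaction_type(raw_type: str) -> str:
--     raw_type_upper = raw_type.upper().strip()
--     hits = [prio for kw, prio in _KEYWORD_PRIORITY.items() if kw in raw_type_upper]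
--     if not hits:
--         return 'OTHER'
--     return _CATEGORIES[min(hits)]
-- ===== Notes on version B (the rewrite author's own statement) =====
-- stated objective: alternative
-- what changed: Instead of a short-circuiting if-cascade, B tests every keyword of a flat keyword-to-priority map, collects the priorities of all matches, and returns the category at the minimum matched priority (OTHER if none matched).
import Mathlib
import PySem

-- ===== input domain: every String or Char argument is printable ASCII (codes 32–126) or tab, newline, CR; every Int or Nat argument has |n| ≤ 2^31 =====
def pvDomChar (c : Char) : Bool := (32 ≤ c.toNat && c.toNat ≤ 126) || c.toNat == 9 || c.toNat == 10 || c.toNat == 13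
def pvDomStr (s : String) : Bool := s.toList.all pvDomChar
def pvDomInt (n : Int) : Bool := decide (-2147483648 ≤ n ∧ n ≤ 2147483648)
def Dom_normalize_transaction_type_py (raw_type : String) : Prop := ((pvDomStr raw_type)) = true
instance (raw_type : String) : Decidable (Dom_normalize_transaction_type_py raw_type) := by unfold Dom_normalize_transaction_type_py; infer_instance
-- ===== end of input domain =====

-- B replaces A's short-circuiting if-cascade with a min-over-all-matches scan of a flat
-- keyword→priority map (alternative decomposition, same cost).

-- ===== PORT A =====
def normalize_transaction_type_py (raw_type : String) : String :=
  let raw_type_upper := PySem.Str.strip (PySem.Str.upper raw_type)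
  if ["PURCHASE", "BUY"].any (fun word => PySem.Str.isIn word raw_type_upper) then "BUY"
  else if ["SALE", "SELL"].any (fun word => PySem.Str.isIn word raw_type_upper) then "SELL"
  else if PySem.Str.isIn "DIVIDEND" raw_type_upper then "DIVIDEND"
  else if PySem.Str.isIn "INTEREST" raw_type_upper then "INTEREST"
  else if ["FEE", "BILL"].any (fun word => PySem.Str.isIn word raw_type_upper) then "FEE"
  else if ["ACH", "DEPOSIT", "WITHDRAWAL", "TRANSFER"].any (fun word => PySem.Str.isIn word raw_type_upper) then "TRANSFER"
  else "OTHER"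

-- ===== PORT B =====
-- _KEYWORD_PRIORITY, iterated in insertion order (dict → association list).
def pvKeyPrio : List (String × Int) :=
  [("PURCHASE", 0), ("BUY", 0),
   ("SALE", 1), ("SELL", 1),
   ("DIVIDEND", 2),
   ("INTEREST", 3),
   ("FEE", 4), ("BILL", 4),
   ("ACH", 5), ("DEPOSIT", 5), ("WITHDRAWAL", 5), ("TRANSFER", 5)]

def pvCats : List String := ["BUY", "SELL", "DIVIDEND", "INTEREST", "FEE", "TRANSFER"]

def normalize_transaction_type_py_alt (raw_type : String) : String :=
  let raw_type_upper := PySem.Str.strip (PySem.Str.upper raw_type)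
  let hits := (pvKeyPrio.filter (fun kp => PySem.Str.isIn kp.1 raw_type_upper)).map Prod.snd
  match PySem.List.min? hits (fun x => x) with
  | none => "OTHER"                                      -- 'if not hits: return OTHER'
  | some m =>
    match PySem.List.pyGet? pvCats m with                -- _CATEGORIES[min(hits)]
    | some c => c
    | none => "OTHER"                                    -- unreachable: min(hits) ∈ [0,5] is always in range

-- ===== PRECONDITION & SPEC =====
def Spec_normalize_transaction_type_py (raw_type : String) (out : String) : Prop := out = normalize_transaction_type_py_alt raw_type
instance (raw_type : String) (out : String) : Decidable (Spec_normalize_transaction_type_py raw_type out) := by unfold Spec_normalize_transaction_type_py; infer_instance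

-- ===== CLAIM =====
def Claim_equal_normalize_transaction_type_py : Prop := ∀ (raw_type : String), Dom_normalize_transaction_type_py raw_type → Spec_normalize_transaction_type_py raw_type (normalize_transaction_type_py raw_type)

-- ===== LEMMAS AND PROOFS =====

-- The hit list B builds from a keyword table, and the priority of the FIRST matching keyword.
def pvHits (u : String) (l : List (String × Int)) : List Int :=
  (l.filter (fun kp => PySem.Str.isIn kp.1 u)).map Prod.snd

def pvFirstIdx (u : String) : List (String × Int) → Option Int
  | [] => none
  | kp :: rest => if PySem.Str.isIn kp.1 u then some kp.2 else pvFirstIdx u rest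

theorem pvFoldlMinEq (v : Int) (t : List Int) (h : ∀ x ∈ t, v ≤ x) : t.foldl min v = v := by
  induction t generalizing v with
  | nil => rfl
  | cons x xs ih =>
    have hx : v ≤ x := h x (by simp)
    simp only [List.foldl_cons, min_eq_left hx]
    exact ih v (fun y hy => h y (by simp [hy]))

theorem pvMemHits {u : String} {l : List (String × Int)} {x : Int}
    (hx : x ∈ pvHits u l) : ∃ kp ∈ l, kp.2 = x := by
  unfold pvHits at hx
  rcases List.mem_map.mp hx with ⟨kp, hkp, rfl⟩
  exact ⟨kp, (List.mem_filter.mp hkp).1, rfl⟩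

-- On a table whose priorities are nondecreasing, the minimum of all matched priorities
-- is the priority of the first matching keyword.
theorem pvMinHitsEq (u : String) (l : List (String × Int))
    (hmono : l.Pairwise (fun a b => a.2 ≤ b.2)) :
    PySem.List.min? (pvHits u l) (fun x => x) = pvFirstIdx u l := by
  induction l with
  | nil => rfl
  | cons kp rest ih =>
    rcases List.pairwise_cons.mp hmono with ⟨hhead, htail⟩
    by_cases h : PySem.Str.isIn kp.1 u
    · rw [PySem.Str.isIn_eq] at h
      have hcons : pvHits u (kp :: rest) = kp.2 :: pvHits u rest := by
        simp [pvHits, h]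
      rw [hcons, PySem.List.min?_id_cons]
      have : (pvHits u rest).foldl min kp.2 = kp.2 := by
        refine pvFoldlMinEq _ _ (fun x hx => ?_)
        rcases pvMemHits hx with ⟨q, hq, rfl⟩
        exact hhead q hq
      simp [this, pvFirstIdx, h]
    · rw [PySem.Str.isIn_eq] at h
      have hcons : pvHits u (kp :: rest) = pvHits u rest := by
        simp [pvHits, h]
      rw [hcons, ih htail]
      simp [pvFirstIdx, h]

-- A's if-cascade returns the category of the first matching keyword of the flat table.
theorem pvCascadeEq (u : String) :
    (if ["PURCHASE", "BUY"].any (fun word => PySem.Str.isIn word u) then "BUY"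
     else if ["SALE", "SELL"].any (fun word => PySem.Str.isIn word u) then "SELL"
     else if PySem.Str.isIn "DIVIDEND" u then "DIVIDEND"
     else if PySem.Str.isIn "INTEREST" u then "INTEREST"
     else if ["FEE", "BILL"].any (fun word => PySem.Str.isIn word u) then "FEE"
     else if ["ACH", "DEPOSIT", "WITHDRAWAL", "TRANSFER"].any (fun word => PySem.Str.isIn word u) then "TRANSFER"
     else "OTHER")
    = (match pvFirstIdx u pvKeyPrio with
       | none => "OTHER"
       | some m =>
         match PySem.List.pyGet? pvCats m with
         | some c => c
         | none => "OTHER") := by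
  simp only [List.any_cons, List.any_nil, Bool.or_false, pvKeyPrio, pvFirstIdx]
  by_cases h1 : PySem.Str.isIn "PURCHASE" u
  · simp only [h1, Bool.true_or, if_true]; rfl
  simp only [h1, Bool.false_or]
  by_cases h2 : PySem.Str.isIn "BUY" u
  · simp only [h2, if_true]; rfl
  simp only [h2]
  by_cases h3 : PySem.Str.isIn "SALE" u
  · simp only [h3, Bool.true_or, if_true]; rfl
  simp only [h3, Bool.false_or]
  by_cases h4 : PySem.Str.isIn "SELL" u
  · simp only [h4, if_true]; rfl
  simp only [h4]
  by_cases h5 : PySem.Str.isIn "DIVIDEND" u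
  · simp only [h5, if_true]; rfl
  simp only [h5]
  by_cases h6 : PySem.Str.isIn "INTEREST" u
  · simp only [h6, if_true]; rfl
  simp only [h6]
  by_cases h7 : PySem.Str.isIn "FEE" u
  · simp only [h7, Bool.true_or, if_true]; rfl
  simp only [h7, Bool.false_or]
  by_cases h8 : PySem.Str.isIn "BILL" u
  · simp only [h8, if_true]; rfl
  simp only [h8]
  by_cases h9 : PySem.Str.isIn "ACH" u
  · simp only [h9, Bool.true_or, if_true]; rfl
  simp only [h9, Bool.false_or]
  by_cases h10 : PySem.Str.isIn "DEPOSIT" u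
  · simp only [h10, Bool.true_or, if_true]; rfl
  simp only [h10, Bool.false_or]
  by_cases h11 : PySem.Str.isIn "WITHDRAWAL" u
  · simp only [h11, Bool.true_or, if_true]; rfl
  simp only [h11, Bool.false_or]
  by_cases h12 : PySem.Str.isIn "TRANSFER" u
  · simp only [h12, if_true]; rfl
  simp only [h12]; rfl

-- ===== VERDICT =====
theorem normalize_transaction_type_py_spec : Claim_equal_normalize_transaction_type_py := by
  intro raw_type _
  unfold Spec_normalize_transaction_type_py normalize_transaction_type_py
    normalize_transaction_type_py_alt
  set u := PySem.Str.strip (PySem.Str.upper raw_type) with hu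
  have hmin : PySem.List.min? (pvHits u pvKeyPrio) (fun x => x) = pvFirstIdx u pvKeyPrio :=
    pvMinHitsEq u pvKeyPrio (by unfold pvKeyPrio; decide)
  calc _ = (match pvFirstIdx u pvKeyPrio with
            | none => "OTHER"
            | some m =>
              match PySem.List.pyGet? pvCats m with
              | some c => c
              | none => "OTHER") := pvCascadeEq u
    _ = _ := by rw [show pvHits u pvKeyPrio = (pvKeyPrio.filter (fun kp => PySem.Str.isIn kp.1 u)).map Prod.snd from rfl] at hmin; rw [← hmin]
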